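-- pv_equiv track=rewrite | github.com/Ngvanphong/PythonDynamo | lesson5.py | MakeForPoint2
-- ===== SOURCE A (Python) =====
-- def MakeForPoint2(listFirst, listNext):
--     listFirst1=[]
--     listNext0=[]
--     listResult=[]
--     for k in range(len(listFirst)):
--         newListSub1=[]
--         for k1 in range(len(listFirst[k])):
--             if k1%2==1:
--                 newListSub1.append(listFirst[k][k1])
--         listFirst1.append(newListSub1)
--     for j in range(len(listNext)):
--         newListSub2=[]
--         for j1 in range(len(listNext[j])):
--             if j1%2==0:
--                 newListSub2.append(listNext[j][j1])
--         listNext0.append(newListSub2)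
--     for m in range(len(listNext0)-1):
--         listNear1= listFirst1[m+1]
--         for n in range(1,len(listNext0[m]),1):
--             listPoint=[listNext0[m][n],listNear1[n-1],listNext0[m+1][n],listNear1[n]]
--             listResult.append(listPoint)
--     return listResult
-- ===== SOURCE B (Python) =====
-- def MakeForPoint2(listFirst, listNext):
--     # Single flat comprehension indexing the original rows directly; no scratch lists.
--     return [
--         [listNext[m][2*n], listFirst[m+1][2*n-1],
--          listNext[m+1][2*n], listFirst[m+1][2*n+1]]
--         for m in range(len(listNext) - 1)
--         for n in range(1, (len(listNext[m]) + 1) // 2)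
--     ]
-- ===== Notes on version B (the rewrite author's own statement) =====
-- stated objective: simpler
-- what changed: Replaces A's three loops and two scratch lists (odd-index extraction of listFirst, even-index extraction of listNext) with one flat comprehension that indexes the original rows directly (listNext[m][2n], listFirst[m+1][2n-1], ...), never materialising the intermediate lists.
import Mathlib
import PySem

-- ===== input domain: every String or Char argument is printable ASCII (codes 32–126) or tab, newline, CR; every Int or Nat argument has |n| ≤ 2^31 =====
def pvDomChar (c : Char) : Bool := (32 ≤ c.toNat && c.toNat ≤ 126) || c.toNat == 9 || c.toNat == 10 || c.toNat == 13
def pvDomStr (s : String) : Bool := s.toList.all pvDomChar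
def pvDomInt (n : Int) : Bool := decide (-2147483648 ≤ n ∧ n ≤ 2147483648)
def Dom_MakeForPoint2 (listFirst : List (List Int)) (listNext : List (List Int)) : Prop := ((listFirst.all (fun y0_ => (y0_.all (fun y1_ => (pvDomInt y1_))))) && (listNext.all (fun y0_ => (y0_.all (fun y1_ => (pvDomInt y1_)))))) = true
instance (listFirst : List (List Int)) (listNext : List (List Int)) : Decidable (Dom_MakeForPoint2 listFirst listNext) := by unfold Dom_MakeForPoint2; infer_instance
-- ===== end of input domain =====

-- B replaces A's two extraction loops and scratch lists with one flat comprehension indexing the original rows directly (simpler).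


-- ===== PORT A =====
-- xs[i] with a default; every use is in range under Pre_ (indices are nonnegative throughout)
def pvRow (xs : List (List Int)) (i : Int) : List Int := PySem.List.pyGetD xs i []
def pvEl (xs : List Int) (i : Int) : Int := PySem.List.pyGetD xs i 0

def MakeForPoint2 (listFirst : List (List Int)) (listNext : List (List Int)) : List (List Int) :=
  let listFirst1 := (PySem.List.pyRange 0 (listFirst.length : Int) 1).foldl (fun acc k =>
      acc ++ [(PySem.List.pyRange 0 ((pvRow listFirst k).length : Int) 1).foldl
        (fun a k1 => if PySem.Int.mod k1 2 == 1 then a ++ [pvEl (pvRow listFirst k) k1] else a) []]) []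
  let listNext0 := (PySem.List.pyRange 0 (listNext.length : Int) 1).foldl (fun acc j =>
      acc ++ [(PySem.List.pyRange 0 ((pvRow listNext j).length : Int) 1).foldl
        (fun a j1 => if PySem.Int.mod j1 2 == 0 then a ++ [pvEl (pvRow listNext j) j1] else a) []]) []
  (PySem.List.pyRange 0 ((listNext0.length : Int) - 1) 1).foldl (fun res m =>
      let listNear1 := pvRow listFirst1 (m + 1)
      (PySem.List.pyRange 1 ((pvRow listNext0 m).length : Int) 1).foldl
        (fun r n => r ++ [[pvEl (pvRow listNext0 m) n, pvEl listNear1 (n - 1),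
                           pvEl (pvRow listNext0 (m + 1)) n, pvEl listNear1 n]]) res) []

-- ===== PORT B =====
def MakeForPoint2_alt (listFirst : List (List Int)) (listNext : List (List Int)) : List (List Int) :=
  (PySem.List.pyRange 0 ((listNext.length : Int) - 1) 1).flatMap (fun m =>
    (PySem.List.pyRange 1 (PySem.Int.floordiv (((pvRow listNext m).length : Int) + 1) 2) 1).map (fun n =>
      [pvEl (pvRow listNext m) (2 * n), pvEl (pvRow listFirst (m + 1)) (2 * n - 1),
       pvEl (pvRow listNext (m + 1)) (2 * n), pvEl (pvRow listFirst (m + 1)) (2 * n + 1)]))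

-- ===== PRECONDITION & SPEC =====
-- Pre_ = exactly the inputs on which A returns (no IndexError): every outer step needs row m+1 of
-- listFirst to exist, and every inner step needs its four source indices in range.
def Pre_MakeForPoint2 (listFirst : List (List Int)) (listNext : List (List Int)) : Prop :=
  ∀ m ∈ List.range (listNext.length - 1),
    m + 1 < listFirst.length ∧
    ∀ n ∈ List.range (((listNext.getD m []).length + 1) / 2),
      1 ≤ n →
        2 * n < (listNext.getD (m + 1) []).length ∧
        2 * n + 1 < (listFirst.getD (m + 1) []).length
instance (listFirst : List (List Int)) (listNext : List (List Int)) : Decidable (Pre_MakeForPoint2 listFirst listNext) := by unfold Pre_MakeForPoint2; infer_instance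
def pvWitness_MakeForPoint2 : List (List Int) × List (List Int) :=
  ([[1, 2, 3, 4], [5, 6, 7, 8]], [[9, 10, 11, 12], [13, 14, 15, 16]])

def Spec_MakeForPoint2 (listFirst : List (List Int)) (listNext : List (List Int)) (out : List (List Int)) : Prop := out = MakeForPoint2_alt listFirst listNext
instance (listFirst : List (List Int)) (listNext : List (List Int)) (out : List (List Int)) : Decidable (Spec_MakeForPoint2 listFirst listNext out) := by unfold Spec_MakeForPoint2; infer_instance

-- ===== CLAIM (what is proved, stated in full; the proofs are below) =====
def Claim_equal_MakeForPoint2 : Prop := ∀ (listFirst : List (List Int)) (listNext : List (List Int)), Dom_MakeForPoint2 listFirst listNext → Pre_MakeForPoint2 listFirst listNext → Spec_MakeForPoint2 listFirst listNext (MakeForPoint2 listFirst listNext)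

-- ===== LEMMAS AND PROOFS =====
-- the even-index and odd-index sublists of a row, as index maps
def pvEv (r : List Int) : List Int := (List.range ((r.length + 1) / 2)).map (fun j => r.getD (2 * j) 0)
def pvOd (r : List Int) : List Int := (List.range (r.length / 2)).map (fun j => r.getD (2 * j + 1) 0)

lemma pv_filt_odd (L : Nat) :
    (List.range L).filter (fun k => k % 2 == 1) = (List.range (L / 2)).map (fun j => 2 * j + 1) := by
  induction L with
  | zero => rfl
  | succ L ih =>
    rw [List.range_succ, List.filter_append, ih]
    rcases Nat.mod_two_eq_zero_or_one L with h | h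
    · have h2 : (L + 1) / 2 = L / 2 := by omega
      simp [h2, h]
    · have h2 : (L + 1) / 2 = L / 2 + 1 := by omega
      have hL : 2 * (L / 2) + 1 = L := by omega
      simp [h2, List.range_succ, h, hL]

lemma pv_filt_even (L : Nat) :
    (List.range L).filter (fun k => k % 2 == 0) = (List.range ((L + 1) / 2)).map (fun j => 2 * j) := by
  induction L with
  | zero => rfl
  | succ L ih =>
    rw [List.range_succ, List.filter_append, ih]
    rcases Nat.mod_two_eq_zero_or_one L with h | h
    · have h2 : (L + 2) / 2 = (L + 1) / 2 + 1 := by omega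
      have hL : 2 * ((L + 1) / 2) = L := by omega
      simp [h2, List.range_succ, h, hL]
    · have h2 : (L + 2) / 2 = (L + 1) / 2 := by omega
      simp [h2, h]

lemma pv_inner_odd (row : List Int) :
    (PySem.List.pyRange 0 (row.length : Int) 1).foldl
      (fun a k1 => if PySem.Int.mod k1 2 == 1 then a ++ [pvEl row k1] else a) [] = pvOd row := by
  rw [PySem.List.foldl_append_if]
  rw [PySem.List.pyRange_zero_nat, List.filter_map]
  simp only [Function.comp_def]
  have hc : (List.range row.length).filter (fun (k : Nat) => PySem.Int.mod (↑k) 2 == 1)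
      = (List.range row.length).filter (fun k => k % 2 == 1) := by
    apply List.filter_congr; intro k _
    simp
    omega
  rw [hc, pv_filt_odd]
  simp only [pvOd, pvEl, List.map_map, Function.comp_def, List.nil_append]
  apply List.map_congr_left
  intro a _
  rw [PySem.List.pyGetD_natCast]

lemma pv_inner_even (row : List Int) :
    (PySem.List.pyRange 0 (row.length : Int) 1).foldl
      (fun a j1 => if PySem.Int.mod j1 2 == 0 then a ++ [pvEl row j1] else a) [] = pvEv row := by
  rw [PySem.List.foldl_append_if]
  rw [PySem.List.pyRange_zero_nat, List.filter_map]
  simp only [Function.comp_def]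
  have hc : (List.range row.length).filter (fun (k : Nat) => PySem.Int.mod (↑k) 2 == 0)
      = (List.range row.length).filter (fun k => k % 2 == 0) := by
    apply List.filter_congr; intro k _
    simp
    omega
  rw [hc, pv_filt_even]
  simp only [pvEv, pvEl, List.map_map, Function.comp_def, List.nil_append]
  apply List.map_congr_left
  intro a _
  rw [PySem.List.pyGetD_natCast]

lemma pv_extract (xs : List (List Int)) (g : List Int → List Int) :
    (PySem.List.pyRange 0 (xs.length : Int) 1).foldl (fun acc k => acc ++ [g (pvRow xs k)]) []
      = xs.map g := by
  rw [PySem.List.foldl_append_singleton_eq_map]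
  have : (PySem.List.pyRange 0 (xs.length : Int) 1).map (fun k => g (pvRow xs k))
      = ((PySem.List.pyRange 0 (xs.length : Int) 1).map (fun k => pvRow xs k)).map g := by
    rw [List.map_map]; rfl
  rw [this]
  have h2 : (PySem.List.pyRange 0 (xs.length : Int) 1).map (fun k => pvRow xs k) = xs := by
    simpa [pvRow] using PySem.List.map_pyGetD_pyRange_zero (xs := xs) (d := ([] : List Int))
  rw [h2]; simp

lemma pv_map_getD (xs : List (List Int)) (f : List Int → List Int) (hf : f [] = []) (i : Nat) :
    (xs.map f).getD i [] = f (xs.getD i []) := by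
  rw [List.getD, List.getD, List.getElem?_map]
  cases xs[i]? <;> simp [hf]

lemma pv_getD_map_range (M : Nat) (f : Nat → Int) (j : Nat) :
    ((List.range M).map f).getD j 0 = if j < M then f j else 0 := by
  by_cases h : j < M
  · rw [List.getD_eq_getElem _ _ (by simpa using h)]; simp [h]
  · rw [List.getD_eq_default _ _ (by simpa using h)]; simp [h]

lemma pv_ev_getD (r : List Int) (j : Nat) : (pvEv r).getD j 0 = r.getD (2 * j) 0 := by
  unfold pvEv
  rw [pv_getD_map_range]
  split
  · rfl
  · rw [List.getD_eq_default]; omega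

lemma pv_od_getD (r : List Int) (j : Nat) : (pvOd r).getD j 0 = r.getD (2 * j + 1) 0 := by
  unfold pvOd
  rw [pv_getD_map_range]
  split
  · rfl
  · rw [List.getD_eq_default]; omega

lemma pv_ev_nil : pvEv [] = [] := rfl
lemma pv_od_nil : pvOd [] = [] := rfl

lemma pv_len_ev (r : List Int) : (pvEv r).length = (r.length + 1) / 2 := by simp [pvEv]

lemma pv_first1 (xs : List (List Int)) :
    (PySem.List.pyRange 0 (xs.length : Int) 1).foldl (fun acc k =>
      acc ++ [(PySem.List.pyRange 0 ((pvRow xs k).length : Int) 1).foldl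
        (fun a k1 => if PySem.Int.mod k1 2 == 1 then a ++ [pvEl (pvRow xs k) k1] else a) []]) []
      = xs.map pvOd := by
  rw [pv_extract xs (fun row => (PySem.List.pyRange 0 (row.length : Int) 1).foldl
        (fun a k1 => if PySem.Int.mod k1 2 == 1 then a ++ [pvEl row k1] else a) [])]
  exact List.map_congr_left (fun row _ => pv_inner_odd row)

lemma pv_next0 (xs : List (List Int)) :
    (PySem.List.pyRange 0 (xs.length : Int) 1).foldl (fun acc j =>
      acc ++ [(PySem.List.pyRange 0 ((pvRow xs j).length : Int) 1).foldl
        (fun a j1 => if PySem.Int.mod j1 2 == 0 then a ++ [pvEl (pvRow xs j) j1] else a) []]) []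
      = xs.map pvEv := by
  rw [pv_extract xs (fun row => (PySem.List.pyRange 0 (row.length : Int) 1).foldl
        (fun a j1 => if PySem.Int.mod j1 2 == 0 then a ++ [pvEl row j1] else a) [])]
  exact List.map_congr_left (fun row _ => pv_inner_even row)

lemma pv_row_map_ev (xs : List (List Int)) (i : Nat) :
    pvRow (xs.map pvEv) (i : Int) = pvEv (xs.getD i []) := by
  simp only [pvRow, PySem.List.pyGetD_natCast]
  exact pv_map_getD xs pvEv pv_ev_nil i

lemma pv_row_map_od (xs : List (List Int)) (i : Nat) :
    pvRow (xs.map pvOd) (i : Int) = pvOd (xs.getD i []) := by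
  simp only [pvRow, PySem.List.pyGetD_natCast]
  exact pv_map_getD xs pvOd pv_od_nil i

lemma pv_row_nat (xs : List (List Int)) (i : Nat) :
    pvRow xs (i : Int) = xs.getD i [] := by
  simp [pvRow]

lemma pv_el_ev (r : List Int) (j : Nat) :
    pvEl (pvEv r) (j : Int) = pvEl r (2 * (j : Int)) := by
  have h : (2 * (j : Int)) = ((2 * j : Nat) : Int) := by push_cast; ring
  simp only [pvEl, h, PySem.List.pyGetD_natCast]
  exact pv_ev_getD r j

lemma pv_el_od (r : List Int) (j : Nat) :
    pvEl (pvOd r) (j : Int) = pvEl r (2 * (j : Int) + 1) := by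
  have h : (2 * (j : Int) + 1) = ((2 * j + 1 : Nat) : Int) := by push_cast; ring
  simp only [pvEl, h, PySem.List.pyGetD_natCast]
  exact pv_od_getD r j

lemma pv_el_od_pred (r : List Int) (j : Nat) (hj : 1 ≤ j) :
    pvEl (pvOd r) ((j : Int) - 1) = pvEl r (2 * (j : Int) - 1) := by
  have h1 : ((j : Int) - 1) = ((j - 1 : Nat) : Int) := by omega
  have h2 : (2 * (j : Int) - 1) = ((2 * j - 1 : Nat) : Int) := by omega
  rw [h1, h2]
  simp only [pvEl, PySem.List.pyGetD_natCast]
  rw [pv_od_getD]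
  congr 1
  omega

-- ===== VERDICT (by name: the statement is the Claim_ definition above) =====
theorem MakeForPoint2_spec : Claim_equal_MakeForPoint2 := by
  intro listFirst listNext _ _
  show MakeForPoint2 listFirst listNext = MakeForPoint2_alt listFirst listNext
  unfold MakeForPoint2 MakeForPoint2_alt
  simp only []
  rw [pv_first1, pv_next0, List.length_map]
  simp only [PySem.List.foldl_append_singleton_eq_map]
  simp only [PySem.List.foldl_append_eq_flatMap]
  rw [List.nil_append]
  apply List.flatMap_congr
  intro m hm
  rw [PySem.List.mem_pyRange_one] at hm
  lift m to Nat using hm.1 with i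
  have hi1 : ((i : Int) + 1) = ((i + 1 : Nat) : Int) := by push_cast; ring
  rw [pv_row_map_ev, hi1, pv_row_map_ev, pv_row_map_od, pv_row_nat, pv_row_nat, pv_row_nat]
  have hb : ((pvEv (listNext.getD i [])).length : Int)
      = PySem.Int.floordiv (((listNext.getD i []).length : Int) + 1) 2 := by
    rw [pv_len_ev]
    have : (((listNext.getD i []).length : Int) + 1) = (((listNext.getD i []).length + 1 : Nat) : Int) := by
      push_cast; ring
    rw [this]
    exact_mod_cast (PySem.Int.floordiv_natCast ((listNext.getD i []).length + 1) 2).symm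
  rw [← hb]
  apply List.map_congr_left
  intro n hn
  rw [PySem.List.mem_pyRange_one] at hn
  have h0 : (0 : Int) ≤ n := by omega
  lift n to Nat using h0 with j
  have hj : 1 ≤ j := by exact_mod_cast hn.1
  rw [pv_el_ev, pv_el_ev, pv_el_od_pred _ _ hj, pv_el_od]
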